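-- pv_equiv track=rewrite | github.com/akhilarayala-26/AI_algorithms | AI/hill_climbing.py | find_best_neighbor
-- ===== SOURCE A (Python) =====
-- def compute_cost(heuristic, path):
--     """Calculate the total path cost using heuristic values."""
--     return sum(heuristic[n] for n in path)
--
-- def swap_neighbors(path):
--     """Generate neighboring solutions by swapping nodes."""
--     neighbors = []
--     for i in range(1, len(path) - 1):  # Ignore start and goal nodes for swapping
--         for j in range(i + 1, len(path) - 1):
--             new_path = path[:]
--             new_path[i], new_path[j] = new_path[j], new_path[i]  # Swap nodes
--             neighbors.append(new_path)
--     return neighbors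
--
-- def find_best_neighbor(graph, heuristic, current_path):
--     """Identify the best neighboring path based on cost."""
--     neighbors = swap_neighbors(current_path)
--
--     best_path = current_path
--     lowest_cost = compute_cost(heuristic, current_path)
--
--     for neighbor in neighbors:
--         neighbor_cost = compute_cost(heuristic, neighbor)
--         if neighbor_cost < lowest_cost:
--             lowest_cost = neighbor_cost
--             best_path = neighbor
--
--     return best_path, lowest_cost
-- ===== SOURCE B (Python) =====
-- def find_best_neighbor(graph, heuristic, current_path):
--     """Every swap-neighbor is a permutation of current_path, and the cost is a
--     permutation-invariant sum, so no neighbor ever beats the current path: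
--     return it with its cost in one O(n) pass."""
--     total = 0
--     for n in current_path:
--         total += heuristic[n]
--     return current_path, total
-- ===== Notes on version B (the rewrite author's own statement) =====
-- stated objective: faster
-- what changed: B drops the neighbor generation and the best-of scan entirely: every swap-neighbor is a permutation of current_path and the cost is a permutation-invariant sum, so B returns (current_path, sum of heuristic values) in a single O(n) pass.
import Mathlib
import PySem

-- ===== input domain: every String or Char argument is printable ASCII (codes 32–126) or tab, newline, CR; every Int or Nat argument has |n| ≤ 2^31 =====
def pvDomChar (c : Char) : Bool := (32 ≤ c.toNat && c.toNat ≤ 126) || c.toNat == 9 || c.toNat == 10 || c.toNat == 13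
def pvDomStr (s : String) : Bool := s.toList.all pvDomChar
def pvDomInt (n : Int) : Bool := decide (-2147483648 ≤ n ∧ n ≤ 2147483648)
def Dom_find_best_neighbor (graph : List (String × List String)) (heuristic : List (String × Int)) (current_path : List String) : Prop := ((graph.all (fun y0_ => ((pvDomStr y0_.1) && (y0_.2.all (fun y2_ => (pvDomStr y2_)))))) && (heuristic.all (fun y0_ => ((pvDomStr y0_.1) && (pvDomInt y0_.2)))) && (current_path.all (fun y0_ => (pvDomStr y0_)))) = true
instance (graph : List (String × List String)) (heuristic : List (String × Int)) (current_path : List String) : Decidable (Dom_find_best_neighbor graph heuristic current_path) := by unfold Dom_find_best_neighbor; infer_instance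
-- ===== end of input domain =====

-- B replaces A's O(n^3) generate-and-scan of swap-neighbors by the closed form
-- (current_path, sum of heuristic values): every neighbor is a permutation, so the sum never improves.


-- ===== PORT A =====
-- heuristic[n]: a KeyError (missing key) is excluded by Pre_; there the port's getD default is never used.
def pvComputeCost (heuristic : List (String × Int)) (path : List String) : Int :=
  path.foldl (fun acc n => acc + (PySem.Dict.mk heuristic).getD n 0) 0

-- one swapped copy new_path of path (both indices are in range whenever this is called)
def pvSwapAt (path : List String) (i j : Int) : List String :=
  (path.set i.toNat (PySem.List.pyGetD path j "")).set j.toNat (PySem.List.pyGetD path i "")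

def pvSwapNeighbors (path : List String) : List (List String) :=
  (PySem.List.pyRange 1 ((path.length : Int) - 1) 1).foldl
    (fun neighbors i =>
      (PySem.List.pyRange (i + 1) ((path.length : Int) - 1) 1).foldl
        (fun neighbors j => neighbors ++ [pvSwapAt path i j]) neighbors)
    []

def find_best_neighbor (graph : List (String × List String)) (heuristic : List (String × Int)) (current_path : List String) : List String × Int :=
  let neighbors := pvSwapNeighbors current_path
  let best_path := current_path
  let lowest_cost := pvComputeCost heuristic current_path
  neighbors.foldl
    (fun st neighbor =>
      let neighbor_cost := pvComputeCost heuristic neighbor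
      if neighbor_cost < st.2 then (neighbor, neighbor_cost) else st)
    (best_path, lowest_cost)

-- ===== PORT B =====
def find_best_neighbor_alt (graph : List (String × List String)) (heuristic : List (String × Int)) (current_path : List String) : List String × Int :=
  (current_path,
   current_path.foldl (fun total n => total + (PySem.Dict.mk heuristic).getD n 0) 0)

-- ===== PRECONDITION & SPEC =====
-- Pre_ excludes exactly the inputs on which A raises KeyError: a path node missing from heuristic
-- (B raises the same KeyError there).
def Pre_find_best_neighbor (graph : List (String × List String)) (heuristic : List (String × Int)) (current_path : List String) : Prop :=
  current_path.all (fun n => heuristic.any (fun p => p.1 == n)) = true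
instance (graph : List (String × List String)) (heuristic : List (String × Int)) (current_path : List String) : Decidable (Pre_find_best_neighbor graph heuristic current_path) := by unfold Pre_find_best_neighbor; infer_instance

def pvWitness_find_best_neighbor : (List (String × List String)) × (List (String × Int)) × List String :=
  ([("a", ["b", "c"]), ("b", ["c"])], [("a", 2), ("b", 3), ("c", 1)], ["a", "c", "b"])

def Spec_find_best_neighbor (graph : List (String × List String)) (heuristic : List (String × Int)) (current_path : List String) (out : List String × Int) : Prop := out = find_best_neighbor_alt graph heuristic current_path
instance (graph : List (String × List String)) (heuristic : List (String × Int)) (current_path : List String) (out : List String × Int) : Decidable (Spec_find_best_neighbor graph heuristic current_path out) := by unfold Spec_find_best_neighbor; infer_instance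

-- ===== CLAIM (what is proved, stated in full; the proofs are below) =====
def Claim_equal_find_best_neighbor : Prop := ∀ (graph : List (String × List String)) (heuristic : List (String × Int)) (current_path : List String), Dom_find_best_neighbor graph heuristic current_path → Pre_find_best_neighbor graph heuristic current_path → Spec_find_best_neighbor graph heuristic current_path (find_best_neighbor graph heuristic current_path)

-- ===== LEMMAS AND PROOFS =====

-- sum of an Int list after setting one in-range position
theorem pv_sum_set (l : List Int) (i : Nat) (x : Int) (hi : i < l.length) :
    (l.set i x).sum = l.sum - l[i] + x := by
  have hdrop : l.drop i = l[i] :: l.drop (i + 1) := List.drop_eq_getElem_cons hi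
  have hl : l.sum = (l.take i).sum + l[i] + (l.drop (i + 1)).sum := by
    conv_lhs => rw [← List.take_append_drop i l, List.sum_append, hdrop, List.sum_cons]
    ring
  rw [List.sum_set, if_pos hi, hl]
  ring

-- the same for a mapped list
theorem pv_sum_map_set (f : String → Int) (l : List String) (i : Nat) (x : String)
    (hi : i < l.length) :
    ((l.set i x).map f).sum = (l.map f).sum - f l[i] + f x := by
  have hi' : i < (l.map f).length := by simpa using hi
  rw [List.map_set, pv_sum_set _ i _ hi', List.getElem_map]

-- swapping two distinct in-range positions preserves the mapped sum
theorem pv_sum_map_swap (f : String → Int) (p : List String) (i j : Nat)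
    (hi : i < p.length) (hj : j < p.length) (hne : i ≠ j) :
    (((p.set i p[j]).set j p[i]).map f).sum = (p.map f).sum := by
  have hj' : j < (p.set i p[j]).length := by simpa using hj
  have hset : (p.set i p[j])[j] = p[j] := by
    simpa using List.getElem_set_ne (l := p) (i := i) (j := j) hne (a := p[j]) (hj := hj')
  rw [pv_sum_map_set f _ j p[i] hj', hset, pv_sum_map_set f p i p[j] hi]
  ring

-- swap_neighbors as a flatMap of maps over the two ranges
theorem pv_swapNeighbors_eq (p : List String) :
    pvSwapNeighbors p =
      (PySem.List.pyRange 1 ((p.length : Int) - 1) 1).flatMap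
        (fun i => (PySem.List.pyRange (i + 1) ((p.length : Int) - 1) 1).map (pvSwapAt p i)) := by
  unfold pvSwapNeighbors
  have hinner : ∀ (acc : List (List String)) (i : Int),
      (PySem.List.pyRange (i + 1) ((p.length : Int) - 1) 1).foldl
        (fun neighbors j => neighbors ++ [pvSwapAt p i j]) acc
      = acc ++ (PySem.List.pyRange (i + 1) ((p.length : Int) - 1) 1).map (pvSwapAt p i) :=
    fun acc i => PySem.List.foldl_append_singleton_eq_map ..
  simp only [hinner]
  simpa using PySem.List.foldl_append_eq_flatMap
    (fun i => (PySem.List.pyRange (i + 1) ((p.length : Int) - 1) 1).map (pvSwapAt p i))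
    (PySem.List.pyRange 1 ((p.length : Int) - 1) 1) []

-- every generated neighbor has the same cost as the path itself
theorem pv_neighbor_cost (heuristic : List (String × Int)) (p nb : List String)
    (hnb : nb ∈ pvSwapNeighbors p) :
    pvComputeCost heuristic nb = pvComputeCost heuristic p := by
  rw [pv_swapNeighbors_eq] at hnb
  simp only [List.mem_flatMap, List.mem_map] at hnb
  obtain ⟨i, hi, j, hj, hswap⟩ := hnb
  rw [PySem.List.mem_pyRange_one] at hi hj
  have h1i : 1 ≤ i := hi.1
  have h0j : i + 1 ≤ j := hj.1
  have hiL : i < (p.length : Int) - 1 := hi.2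
  have hjL : j < (p.length : Int) - 1 := hj.2
  have hiN : i.toNat < p.length := by omega
  have hjN : j.toNat < p.length := by omega
  have hneN : i.toNat ≠ j.toNat := by omega
  have hgi : PySem.List.pyGetD p i "" = p[i.toNat] := by
    rw [PySem.List.pyGetD_of_nonneg p "" (by omega), List.getD_eq_getElem p "" hiN]
  have hgj : PySem.List.pyGetD p j "" = p[j.toNat] := by
    rw [PySem.List.pyGetD_of_nonneg p "" (by omega), List.getD_eq_getElem p "" hjN]
  subst hswap
  unfold pvComputeCost pvSwapAt
  rw [PySem.List.foldl_add, PySem.List.foldl_add, hgi, hgj,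
    pv_sum_map_swap _ p i.toNat j.toNat hiN hjN hneN]

-- a best-of fold over equal-cost neighbors never moves off the start state
theorem pv_fold_no_improve (heuristic : List (String × Int)) (p : List String)
    (nbs : List (List String)) (c : Int)
    (hall : ∀ nb ∈ nbs, pvComputeCost heuristic nb = c) :
    nbs.foldl
      (fun st neighbor =>
        let neighbor_cost := pvComputeCost heuristic neighbor
        if neighbor_cost < st.2 then (neighbor, neighbor_cost) else st)
      (p, c) = (p, c) := by
  induction nbs with
  | nil => rfl
  | cons nb t ih =>
    have hc : pvComputeCost heuristic nb = c := hall nb (List.mem_cons_self ..)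
    simp only [List.foldl, hc, lt_irrefl]
    exact ih (fun x hx => hall x (List.mem_cons_of_mem _ hx))

-- ===== VERDICT (by name: the statement is the Claim_ definition above) =====
theorem find_best_neighbor_spec : Claim_equal_find_best_neighbor := by
  intro graph heuristic current_path _ _
  unfold Spec_find_best_neighbor find_best_neighbor find_best_neighbor_alt
  simp only []
  rw [pv_fold_no_improve heuristic current_path _ _
    (fun nb hnb => pv_neighbor_cost heuristic current_path nb hnb)]
  rfl
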